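-- pv_equiv track=rewrite | github.com/mahmoudparsian/data-algorithms-with-spark | code/chap10/python/minmax_use_mappartitions_v2.py | find_min_max_count
-- ===== SOURCE A (Python) =====
-- def find_min_max_count(min_max_count_list):
--     first_time = True
--     #  iterate tuple3 in min_max_count_list:
--     for local_min, local_max, local_count in min_max_count_list:
--         if (first_time):
--             final_min = local_min
--             final_max = local_max
--             final_count = local_count
--             first_time = False
--         else:
--             final_min = min(final_min, local_min)
--             final_max = max(final_max, local_max)
--             final_count += local_count
--     #end-for
--     return (final_min, final_max, final_count)
-- ===== SOURCE B (Python) =====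
-- def find_min_max_count(min_max_count_list):
--     firsts, seconds, thirds = zip(*min_max_count_list)
--     return (min(firsts), max(seconds), sum(thirds))
-- ===== Notes on version B (the rewrite author's own statement) =====
-- stated objective: idiomatic
-- what changed: Replaces the fused first_time-flag loop by a single zip(*...) transpose followed by three independent library reductions min/max/sum over the three columns.
import Mathlib
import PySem

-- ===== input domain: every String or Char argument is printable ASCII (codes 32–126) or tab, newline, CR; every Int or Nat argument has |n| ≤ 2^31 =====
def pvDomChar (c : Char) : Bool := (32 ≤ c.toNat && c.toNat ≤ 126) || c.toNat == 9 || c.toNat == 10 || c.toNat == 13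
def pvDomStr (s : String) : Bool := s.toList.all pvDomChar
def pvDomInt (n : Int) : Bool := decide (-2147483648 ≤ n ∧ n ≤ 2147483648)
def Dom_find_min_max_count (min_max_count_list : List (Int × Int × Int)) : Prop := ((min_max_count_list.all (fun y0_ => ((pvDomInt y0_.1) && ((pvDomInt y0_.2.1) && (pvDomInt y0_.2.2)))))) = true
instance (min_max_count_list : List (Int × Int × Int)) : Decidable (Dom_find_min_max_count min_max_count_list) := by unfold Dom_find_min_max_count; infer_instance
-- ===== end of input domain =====

-- B replaces A's fused first_time-flag loop by a transpose (zip(*...)) and three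
-- independent column reductions min/max/sum (idiomatic; same O(n) cost).


-- ===== PORT A =====
-- The loop's state: none = first_time (final_* unbound); some (min, max, count) afterwards.
-- On [] Python raises UnboundLocalError; the .getD default is never reached inside Pre_.
def find_min_max_count (min_max_count_list : List (Int × Int × Int)) : Int × Int × Int :=
  (min_max_count_list.foldl
    (fun st t =>
      match st with
      | none => some (t.1, t.2.1, t.2.2)
      | some (fmin, fmax, fcnt) => some (min fmin t.1, max fmax t.2.1, fcnt + t.2.2))
    none).getD (0, 0, 0)

-- ===== PORT B =====
-- zip(*l) = the three columns; min/max with no key; sum. On [] Python B raises ValueError.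
def find_min_max_count_alt (min_max_count_list : List (Int × Int × Int)) : Int × Int × Int :=
  let firsts := min_max_count_list.map (·.1)
  let seconds := min_max_count_list.map (·.2.1)
  let thirds := min_max_count_list.map (·.2.2)
  ((PySem.List.min? firsts (fun y => y)).getD 0,
   (PySem.List.max? seconds (fun y => y)).getD 0,
   thirds.sum)

-- ===== PRECONDITION & SPEC =====
-- A raises UnboundLocalError (and B ValueError) on the empty list; both return on any other input.
def Pre_find_min_max_count (min_max_count_list : List (Int × Int × Int)) : Prop :=
  min_max_count_list ≠ []
instance (min_max_count_list : List (Int × Int × Int)) : Decidable (Pre_find_min_max_count min_max_count_list) := by unfold Pre_find_min_max_count; infer_instance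
def pvWitness_find_min_max_count : (List (Int × Int × Int)) := [(1, 2, 3), (-1, 5, 4)]

def Spec_find_min_max_count (min_max_count_list : List (Int × Int × Int)) (out : Int × Int × Int) : Prop := out = find_min_max_count_alt min_max_count_list
instance (min_max_count_list : List (Int × Int × Int)) (out : Int × Int × Int) : Decidable (Spec_find_min_max_count min_max_count_list out) := by unfold Spec_find_min_max_count; infer_instance

-- ===== CLAIM (what is proved, stated in full; the proofs are below) =====
def Claim_equal_find_min_max_count : Prop := ∀ (min_max_count_list : List (Int × Int × Int)), Dom_find_min_max_count min_max_count_list → Pre_find_min_max_count min_max_count_list → Spec_find_min_max_count min_max_count_list (find_min_max_count min_max_count_list)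

-- ===== LEMMAS AND PROOFS =====
-- After the first tuple, A's fold is the pointwise (min, max, +) fold over the columns.
theorem pvFoldA (xs : List (Int × Int × Int)) (m M c : Int) :
    (xs.foldl
      (fun st t =>
        match st with
        | none => some (t.1, t.2.1, t.2.2)
        | some (fmin, fmax, fcnt) => some (min fmin t.1, max fmax t.2.1, fcnt + t.2.2))
      (some (m, M, c)))
    = some ((xs.map (·.1)).foldl min m, (xs.map (·.2.1)).foldl max M,
            c + (xs.map (·.2.2)).sum) := by
  induction xs generalizing m M c with
  | nil => simp
  | cons x t ih => simp [List.foldl_cons, ih]; ring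

theorem find_min_max_count_spec : Claim_equal_find_min_max_count := by
  intro l _ hpre
  unfold Spec_find_min_max_count
  match l with
  | [] => exact absurd rfl hpre
  | x :: xs =>
    simp only [find_min_max_count, find_min_max_count_alt, List.foldl_cons, List.map_cons,
      PySem.List.min?_id_cons, PySem.List.max?_id_cons, pvFoldA, Option.getD_some, List.sum_cons]
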